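-- pv_equiv track=rewrite | github.com/freaktiful/aoc-2021 | day 18/main.py | read_left_right
-- ===== SOURCE A (Python) =====
-- def read_left_right(oper):
--     left = ''
--     right = ''
--     oper = oper[1:len(oper)-1]
--     if oper[0] != '[':
--         aux = oper.find(',')
--         left = oper[0: aux]
--         right = oper[aux+1:]
--     else:
--         pile = []
--         length_left = 0
--         for i in range(len(oper)):
--             if oper[i] == '[':
--                 pile.append(oper[i])
--             if oper[i] == ']':
--                 pile.pop()
--             if len(pile) == 0:
--                 length_left = i
--                 break
--         left = oper[0:length_left+1]
--         right = oper[length_left+2:]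
--     return left, right
-- ===== SOURCE B (Python) =====
-- def read_left_right(oper):
--     inner = oper[1:len(oper)-1]
--     if inner[0] != '[':
--         cut = inner.find(',')
--     else:
--         # first index whose whole prefix has equal '[' and ']' counts: that index
--         # is the closing bracket of the left element, so the cut (comma) is right after it
--         cut = next((i + 1 for i in range(len(inner))
--                     if inner[:i + 1].count('[') == inner[:i + 1].count(']')), 0)
--     return inner[:cut], inner[cut + 1:]
-- ===== Notes on version B (the rewrite author's own statement) =====
-- stated objective: alternative
-- what changed: Replaces A's stateful stack scan (push '[', pop ']', break on empty) by a stateless search over candidate indices that recounts each whole prefix with str.count and picks the first balanced one, returning one uniform pair of slices for both branches; it trades the O(n) incremental scan for an O(n^2) per-prefix recount.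
-- intended difference: On inputs whose inner string starts with '[' but no prefix of the inner string is bracket-balanced, A returns leftover loop state (it splits right after the inner string's first character), while B returns an empty left part with the rest of the inner string after its first character as the right part, the natural result when no matching bracket exists. — e.g. on read_left_right("[[["): A returns ("[", ""), B returns ("", "")
import Mathlib
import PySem

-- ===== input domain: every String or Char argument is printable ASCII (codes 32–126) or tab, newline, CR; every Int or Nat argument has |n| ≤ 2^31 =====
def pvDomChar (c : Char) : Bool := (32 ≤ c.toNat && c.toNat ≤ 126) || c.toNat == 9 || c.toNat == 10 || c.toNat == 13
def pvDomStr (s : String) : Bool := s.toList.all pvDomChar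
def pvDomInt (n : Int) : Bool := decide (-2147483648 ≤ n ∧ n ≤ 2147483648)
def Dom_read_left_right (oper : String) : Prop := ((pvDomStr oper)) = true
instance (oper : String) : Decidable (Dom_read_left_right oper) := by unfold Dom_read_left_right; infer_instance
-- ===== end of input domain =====

-- B replaces A's stateful stack scan by a stateless search over candidate indices,
-- recounting each whole prefix's brackets and picking the first balanced one (alternative).

-- ===== PORT A =====
-- the `for i in range(len(oper))` loop with `break`: structural recursion over the
-- characters with the running index i and the pile list
def pvLoopA : List Char → Nat → List Char → Nat
  | [], _i, _pile => 0                      -- loop finished without break: length_left keeps 0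
  | c :: rest, i, pile =>
    let pile1 := if c = '[' then pile ++ [c] else pile
    -- pile.pop(): in this branch inner starts with '[', so the pile is provably
    -- nonempty whenever ']' is seen before the break (Python's pop never raises here)
    let pile2 := if c = ']' then pile1.dropLast else pile1
    if pile2.length = 0 then i else pvLoopA rest (i + 1) pile2

def read_left_right (oper : String) : String × String :=
  let s := oper.toList
  let inner := PySem.List.slice s (some 1) (some ((s.length : Int) - 1))   -- oper[1:len(oper)-1]
  match PySem.List.pyGet? inner 0 with          -- oper[0]
  | none => ("", "")                            -- IndexError: excluded by Pre_
  | some c0 =>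
    if c0 ≠ '[' then
      let aux := PySem.Chars.find inner [',']   -- oper.find(',')
      (String.ofList (PySem.List.slice inner (some 0) (some aux)),        -- oper[0:aux]
       String.ofList (PySem.List.slice inner (some (aux + 1)) none))      -- oper[aux+1:]
    else
      let ll := pvLoopA inner 0 []
      (String.ofList (PySem.List.slice inner (some 0) (some ((ll : Int) + 1))),   -- oper[0:length_left+1]
       String.ofList (PySem.List.slice inner (some ((ll : Int) + 2)) none))       -- oper[length_left+2:]

-- ===== PORT B =====
-- the generator `next((i+1 for i in range(len(inner)) if inner[:i+1].count('[') == inner[:i+1].count(']')), 0)`: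
-- search over candidate indices recounting each prefix afresh
-- (Python str.count of a one-character needle is exactly List.count of that character)
-- structural recursion on the remaining suffix of inner (= the rest of `range(len(inner))`),
-- with i the current candidate index; each step recounts the whole prefix afresh
def pvScanB (inner : List Char) : List Char → Nat → Int
  | [], _ => 0                                  -- generator exhausted: the `next` default
  | _ :: rest, i =>
    if (inner.take (i+1)).count '[' = (inner.take (i+1)).count ']' then ((i : Int) + 1)
    else pvScanB inner rest (i+1)

def read_left_right_alt (oper : String) : String × String :=
  let s := oper.toList
  let inner := PySem.List.slice s (some 1) (some ((s.length : Int) - 1))   -- oper[1:len(oper)-1]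
  match PySem.List.pyGet? inner 0 with          -- inner[0]
  | none => ("", "")                            -- IndexError: excluded by Pre_
  | some c0 =>
    let cut : Int := if c0 ≠ '[' then PySem.Chars.find inner [','] else pvScanB inner inner 0
    (String.ofList (PySem.List.slice inner (some 0) (some cut)),          -- inner[:cut]
     String.ofList (PySem.List.slice inner (some (cut + 1)) none))        -- inner[cut+1:]

-- ===== PRECONDITION & SPEC =====
-- Python A raises IndexError (oper[0] on the empty stripped string) iff len(oper) < 3
def Pre_read_left_right (oper : String) : Prop := 3 ≤ oper.toList.length
instance (oper : String) : Decidable (Pre_read_left_right oper) := by unfold Pre_read_left_right; infer_instance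
def pvWitness_read_left_right : String := "[1,2]"

-- On inputs whose inner string starts with an opening bracket but no prefix of the inner string is
-- bracket-balanced, A returns leftover loop state (it splits right after the inner string's first
-- character), while B returns an empty left part with the rest of the inner string after its first
-- character as the right part, the natural result when no matching bracket exists.
def D_read_left_right (oper : String) : Prop :=
  let inner := PySem.List.slice oper.toList (some 1) (some ((oper.toList.length : Int) - 1))
  inner.head? = some '[' ∧
    ∀ k, k < inner.length → (inner.take (k + 1)).count '[' ≠ (inner.take (k + 1)).count ']'
instance (oper : String) : Decidable (D_read_left_right oper) := by unfold D_read_left_right; infer_instance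

def Spec_read_left_right (oper : String) (out : String × String) : Prop :=
  ¬ D_read_left_right oper → out = read_left_right_alt oper
instance (oper : String) (out : String × String) : Decidable (Spec_read_left_right oper out) := by unfold Spec_read_left_right; infer_instance

def pvDiffWitness_read_left_right : String := "[[["
def pvDiffWitnessOut_read_left_right : (String × String) × (String × String) := (("[", ""), ("", ""))

-- ===== CLAIM (what is proved, stated in full; the proofs are below) =====
def Claim_unchanged_read_left_right : Prop := ∀ (oper : String), Dom_read_left_right oper → Pre_read_left_right oper → Spec_read_left_right oper (read_left_right oper)
def Claim_changed_read_left_right : Prop := Dom_read_left_right (pvDiffWitness_read_left_right) ∧ Pre_read_left_right (pvDiffWitness_read_left_right) ∧ D_read_left_right (pvDiffWitness_read_left_right) ∧ read_left_right (pvDiffWitness_read_left_right) = pvDiffWitnessOut_read_left_right.1 ∧ read_left_right_alt (pvDiffWitness_read_left_right) = pvDiffWitnessOut_read_left_right.2 ∧ pvDiffWitnessOut_read_left_right.1 ≠ pvDiffWitnessOut_read_left_right.2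
def Claim_exact_read_left_right : Prop := ∀ (oper : String), Dom_read_left_right oper → Pre_read_left_right oper → D_read_left_right oper → read_left_right oper ≠ read_left_right_alt oper

-- ===== LEMMAS AND PROOFS =====

-- reference scan: number of further characters consumed until the nesting depth first hits 0
def pvBrk : List Char → Int → Option Nat
  | [], _ => none
  | c :: rest, d =>
    let d' := d + (if c = '[' then (1 : Int) else 0) - (if c = ']' then (1 : Int) else 0)
    if d' = 0 then some 0 else (pvBrk rest d').map (· + 1)

lemma pvLoopA_brk (t : List Char) : ∀ (i : Nat) (pile : List Char), pile ≠ [] →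
    pvLoopA t i pile = match pvBrk t (pile.length : Int) with | some k => i + k | none => 0 := by
  induction t with
  | nil => intro i pile _; simp [pvLoopA, pvBrk]
  | cons c rest ih =>
    intro i pile hne
    have hlen : 1 ≤ pile.length := List.length_pos_of_ne_nil hne
    simp only [pvLoopA, pvBrk]
    by_cases hb : c = '['
    · have h2 : ((if c = ']' then ((if c = '[' then pile ++ [c] else pile).dropLast) else (if c = '[' then pile ++ [c] else pile))) = pile ++ [c] := by
        simp [hb]
      rw [h2]
      have hlen2 : (pile ++ [c]).length = pile.length + 1 := by simp
      have hne2 : (pile ++ [c]).length ≠ 0 := by omega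
      have hd : (pile.length : Int) + (if c = '[' then (1:Int) else 0) - (if c = ']' then (1:Int) else 0) = ((pile.length + 1 : Nat) : Int) := by
        simp [hb]
      have hdne : (pile.length : Int) + (if c = '[' then (1:Int) else 0) - (if c = ']' then (1:Int) else 0) ≠ 0 := by
        rw [hd]; positivity
      rw [if_neg hne2, if_neg hdne, ih (i+1) (pile ++ [c]) (by simp), hd, hlen2]
      cases hk : pvBrk rest ((pile.length + 1 : Nat) : Int) with
      | none => simp
      | some k => simp; ring
    · by_cases hr : c = ']'
      · have h2 : ((if c = ']' then ((if c = '[' then pile ++ [c] else pile).dropLast) else (if c = '[' then pile ++ [c] else pile))) = pile.dropLast := by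
          simp [hr]
        rw [h2]
        have hld : pile.dropLast.length = pile.length - 1 := by simp
        have hd : (pile.length : Int) + (if c = '[' then (1:Int) else 0) - (if c = ']' then (1:Int) else 0) = ((pile.length - 1 : Nat) : Int) := by
          simp [hr]; omega
        by_cases h1 : pile.length = 1
        · have : pile.dropLast.length = 0 := by omega
          rw [if_pos this]
          have : (pile.length : Int) + (if c = '[' then (1:Int) else 0) - (if c = ']' then (1:Int) else 0) = 0 := by
            rw [hd]; omega
          simp [this]
        · have hge : 2 ≤ pile.length := by omega
          have hne0 : pile.dropLast.length ≠ 0 := by omega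
          have hdne : (pile.length : Int) + (if c = '[' then (1:Int) else 0) - (if c = ']' then (1:Int) else 0) ≠ 0 := by
            rw [hd]; omega
          rw [if_neg hne0, if_neg hdne, ih (i+1) pile.dropLast (by intro h; rw [h] at hne0; simp at hne0), hd, hld]
          cases hk : pvBrk rest ((pile.length - 1 : Nat) : Int) with
          | none => simp
          | some k => simp; ring
      · have h2 : ((if c = ']' then ((if c = '[' then pile ++ [c] else pile).dropLast) else (if c = '[' then pile ++ [c] else pile))) = pile := by
          simp [hb, hr]
        rw [h2]
        have hd : (pile.length : Int) + (if c = '[' then (1:Int) else 0) - (if c = ']' then (1:Int) else 0) = (pile.length : Int) := by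
          simp [hb, hr]
        have hdne : (pile.length : Int) + (if c = '[' then (1:Int) else 0) - (if c = ']' then (1:Int) else 0) ≠ 0 := by
          rw [hd]; omega
        rw [if_neg (by omega : pile.length ≠ 0), if_neg hdne, ih (i+1) pile hne, hd]
        cases hk : pvBrk rest (pile.length : Int) with
        | none => simp
        | some k => simp; ring

lemma pvBrk_none_iff (t : List Char) : ∀ (d : Int),
    pvBrk t d = none ↔
      ∀ k, k < t.length →
        d + ((t.take (k + 1)).count '[' : Int) - ((t.take (k + 1)).count ']' : Int) ≠ 0 := by
  induction t with
  | nil => intro d; simp [pvBrk]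
  | cons c rest ih =>
    intro d
    simp only [pvBrk]
    set d' := d + (if c = '[' then (1 : Int) else 0) - (if c = ']' then (1 : Int) else 0) with hd'
    have hcnt : ∀ (a : Char) (l : List Char), (c :: l).count a = l.count a + (if c = a then 1 else 0) := by
      intro a l
      rw [List.count_cons]
      by_cases h : a = c
      · simp [h]
      · have h2 : ¬ c = a := fun hh => h hh.symm
        simp [h2]
    by_cases h0 : d' = 0
    · simp only [if_pos h0]
      constructor
      · intro h; exact absurd h (by simp)
      · intro h
        exfalso
        refine h 0 (by simp) ?_
        simpa [hcnt] using h0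
    · simp only [if_neg h0, Option.map_eq_none_iff, ih d']
      constructor
      · intro h k hk
        match k with
        | 0 =>
          intro hc
          refine h0 ?_
          simpa [hcnt] using hc
        | j + 1 =>
          have hj : j < rest.length := by simpa using hk
          have := h j hj
          simp only [List.take_succ_cons, hcnt] at *
          intro hc
          refine this ?_
          push_cast at hc ⊢
          omega
      · intro h j hj
        have := h (j + 1) (by simpa using Nat.succ_lt_succ hj)
        simp only [List.take_succ_cons, hcnt] at this
        intro hc
        refine this ?_
        push_cast at hc ⊢
        omega

-- forward characterisation of a successful depth scan: it breaks at the FIRST zero of the depth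
lemma pvBrk_some (t : List Char) : ∀ (d : Int) (m : Nat), pvBrk t d = some m →
    m < t.length ∧
      d + ((t.take (m + 1)).count '[' : Int) - ((t.take (m + 1)).count ']' : Int) = 0 ∧
      ∀ k, k < m → d + ((t.take (k + 1)).count '[' : Int) - ((t.take (k + 1)).count ']' : Int) ≠ 0 := by
  induction t with
  | nil => intro d m h; simp [pvBrk] at h
  | cons c rest ih =>
    intro d m h
    simp only [pvBrk] at h
    set d' := d + (if c = '[' then (1 : Int) else 0) - (if c = ']' then (1 : Int) else 0) with hd'
    have hcnt : ∀ (a : Char) (l : List Char), (c :: l).count a = l.count a + (if c = a then 1 else 0) := by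
      intro a l
      rw [List.count_cons]
      by_cases hh : a = c
      · simp [hh]
      · have h2 : ¬ c = a := fun hhh => hh hhh.symm
        simp [h2]
    by_cases h0 : d' = 0
    · rw [if_pos h0] at h
      have hm : m = 0 := by simpa using h.symm
      subst hm
      refine ⟨by simp, ?_, by intro k hk; omega⟩
      simpa [hcnt] using h0
    · rw [if_neg h0] at h
      obtain ⟨j, hj, hjm⟩ := Option.map_eq_some_iff.mp h
      obtain ⟨hlen, hbal, hprev⟩ := ih d' j hj
      subst hjm
      refine ⟨by simpa using Nat.succ_lt_succ hlen, ?_, ?_⟩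
      · simp only [List.take_succ_cons, hcnt]
        push_cast
        omega
      · intro k hk
        match k with
        | 0 =>
          intro hc
          refine h0 ?_
          simpa [hcnt] using hc
        | k' + 1 =>
          have := hprev k' (by omega)
          simp only [List.take_succ_cons, hcnt]
          intro hc
          refine this ?_
          push_cast at hc ⊢
          omega

-- generator exhausted: no candidate prefix is balanced, so the default 0 is returned
lemma pvScanB_none (inner : List Char)
    (h : ∀ k, k < inner.length → (inner.take (k + 1)).count '[' ≠ (inner.take (k + 1)).count ']') :
    ∀ (l : List Char) (i : Nat), inner.length = i + l.length → pvScanB inner l i = 0 := by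
  intro l
  induction l with
  | nil => intro i _; rfl
  | cons c rest ihn =>
    intro i hi
    simp only [List.length_cons] at hi
    simp only [pvScanB]
    rw [if_neg (h i (by omega))]
    exact ihn (i + 1) (by omega)

-- the search stops exactly at the first balanced prefix
lemma pvScanB_reaches (inner : List Char) (tgt : Nat) (hlt : tgt < inner.length)
    (hb : (inner.take (tgt + 1)).count '[' = (inner.take (tgt + 1)).count ']') :
    ∀ (l : List Char) (i : Nat), inner.length = i + l.length → i ≤ tgt →
      (∀ k, i ≤ k → k < tgt → (inner.take (k + 1)).count '[' ≠ (inner.take (k + 1)).count ']') →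
      pvScanB inner l i = (tgt : Int) + 1 := by
  intro l
  induction l with
  | nil =>
    intro i hlen hle _
    simp only [List.length_nil] at hlen
    omega
  | cons c rest ihn =>
    intro i hlen hle hk
    simp only [List.length_cons] at hlen
    simp only [pvScanB]
    by_cases hit : i = tgt
    · subst hit
      rw [if_pos hb]
    · have hi : i < tgt := by omega
      rw [if_neg (hk i (le_refl i) hi)]
      exact ihn (i + 1) (by omega) (by omega) (fun k h1 h2 => hk k (by omega) h2)

-- ===== VERDICT (by name: the statement is the Claim_ definition above) =====
theorem read_left_right_spec : Claim_unchanged_read_left_right := by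
  intro oper _hdom _hpre hnD
  unfold D_read_left_right at hnD
  simp only [read_left_right, read_left_right_alt]
  cases hinner : PySem.List.slice oper.toList (some 1) (some ((oper.toList.length : Int) - 1)) with
  | nil => simp [PySem.List.pyGet?]
  | cons c t =>
    rw [hinner] at hnD
    have hget : PySem.List.pyGet? (c :: t) (0 : Int) = some c := by
      simp [PySem.List.pyGet?, PySem.List.pyIdx?]
    rw [hget]
    by_cases hc : c = '['
    · subst hc
      simp only [if_neg (by simp : ¬ ('[' : Char) ≠ '[')]
      -- ¬D with head '[' gives a balanced prefix, hence the scans break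
      have hbrk : pvBrk t 1 ≠ none := by
        intro hnone
        refine hnD ⟨rfl, ?_⟩
        intro k hk
        match k with
        | 0 => simp
        | j + 1 =>
          have := (pvBrk_none_iff t 1).mp hnone j (by simpa using hk)
          simp only [List.take_succ_cons, List.count_cons]
          intro hcc
          refine this ?_
          push_cast at hcc ⊢
          simp at hcc ⊢
          omega
      obtain ⟨m, hm⟩ : ∃ m, pvBrk t 1 = some m := by
        cases hb : pvBrk t 1 with
        | none => exact absurd hb hbrk
        | some m => exact ⟨m, rfl⟩
      obtain ⟨hmlt, hbal, hprev⟩ := pvBrk_some t 1 m hm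
      have hA : pvLoopA ('[' :: t) 0 [] = 1 + m := by
        have h1 : pvLoopA ('[' :: t) 0 [] = pvLoopA t 1 ['['] := by
          simp [pvLoopA]
        rw [h1, pvLoopA_brk t 1 ['['] (by simp)]
        simp [hm]
      -- B's search: the first balanced prefix of '[' :: t ends at index m + 1
      have htb : (('[' :: t).take (m + 2)).count '[' = (('[' :: t).take (m + 2)).count ']' := by
        simp only [List.take_succ_cons, List.count_cons]
        simp at hbal ⊢
        omega
      have hkb : ∀ k, 0 ≤ k → k < m + 1 →
          (('[' :: t).take (k + 1)).count '[' ≠ (('[' :: t).take (k + 1)).count ']' := by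
        intro k _ hk
        match k with
        | 0 => simp
        | j + 1 =>
          have := hprev j (by omega)
          simp only [List.take_succ_cons, List.count_cons]
          intro hcc
          refine this ?_
          push_cast at hcc ⊢
          simp at hcc ⊢
          omega
      have hB : pvScanB ('[' :: t) ('[' :: t) 0 = ((m + 1 : Nat) : Int) + 1 :=
        pvScanB_reaches ('[' :: t) (m + 1) (by simpa using Nat.succ_lt_succ hmlt) htb
          ('[' :: t) 0 (by simp) (by omega) hkb
      rw [hA, hB]
      have e1 : ((1 + m : Nat) : Int) + 1 = ((m + 1 : Nat) : Int) + 1 := by push_cast; ring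
      have e2 : ((1 + m : Nat) : Int) + 2 = ((m + 1 : Nat) : Int) + 1 + 1 := by push_cast; ring
      rw [e1, e2]
    · simp [hc]

theorem read_left_right_tight : Claim_exact_read_left_right := by
  intro oper _hdom _hpre hD
  unfold D_read_left_right at hD
  simp only [read_left_right, read_left_right_alt]
  cases hinner : PySem.List.slice oper.toList (some 1) (some ((oper.toList.length : Int) - 1)) with
  | nil => rw [hinner] at hD; simp at hD
  | cons c t =>
    rw [hinner] at hD
    obtain ⟨hhead, hall⟩ := hD
    have hc : c = '[' := by simpa using hhead
    subst hc
    have hget : PySem.List.pyGet? (('[' : Char) :: t) (0 : Int) = some '[' := by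
      simp [PySem.List.pyGet?, PySem.List.pyIdx?]
    rw [hget]
    have hnone : pvBrk t 1 = none := by
      rw [pvBrk_none_iff]
      intro j hj hcc
      have := hall (j + 1) (by simpa using Nat.succ_lt_succ hj)
      simp only [List.take_succ_cons, List.count_cons] at this
      refine this ?_
      push_cast at hcc ⊢
      simp at hcc ⊢
      omega
    have hA : pvLoopA ('[' :: t) 0 [] = 0 := by
      have h1 : pvLoopA ('[' :: t) 0 [] = pvLoopA t 1 ['['] := by
        simp [pvLoopA]
      rw [h1, pvLoopA_brk t 1 ['['] (by simp)]
      simp [hnone]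
    have hB : pvScanB ('[' :: t) ('[' :: t) 0 = 0 :=
      pvScanB_none ('[' :: t) hall ('[' :: t) 0 (by simp)
    rw [hA, hB]
    simp only [if_neg (by simp : ¬ ('[' : Char) ≠ '[')]
    intro h
    -- left of A is inner[:1] = ['['], left of B is inner[:0] = []
    have h1 := congrArg (fun p => p.1.toList) h
    simp only [String.toList_ofList, PySem.List.slice_zero_start] at h1
    norm_num [PySem.List.slice_to] at h1

theorem read_left_right_changed : Claim_changed_read_left_right := by
  unfold Claim_changed_read_left_right; decide
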